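-- pv_equiv track=rewrite | github.com/yuu0223/Python-DSA | HW4/hash_table_06170223.py | ascii_sum
-- ===== SOURCE A (Python) =====
-- def ascii_sum(val): #將輸入的值轉為數字
--
--     ascii_word = []
--     total_sum = 0
--
--     for i in val:
--         trans = ord(i)
--         ascii_word.append(trans)
--
--     b =len(ascii_word)-1
--
--     for a in ascii_word:
--         sum_word = a*(10**b)
--         total_sum = total_sum+sum_word
--         b=b-1
--
--     return total_sum
-- ===== SOURCE B (Python) =====
-- def ascii_sum(val):
--     total = 0
--     for ch in val:
--         total = total * 10 + ord(ch)
--     return total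
-- ===== Notes on version B (the rewrite author's own statement) =====
-- stated objective: faster
-- what changed: Replaced the two-pass version (build list of ords, then sum a*10**b with a decreasing exponent, where each big-int power costs O(n)) by a single-pass Horner accumulation total = total*10 + ord(ch).
import Mathlib
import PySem

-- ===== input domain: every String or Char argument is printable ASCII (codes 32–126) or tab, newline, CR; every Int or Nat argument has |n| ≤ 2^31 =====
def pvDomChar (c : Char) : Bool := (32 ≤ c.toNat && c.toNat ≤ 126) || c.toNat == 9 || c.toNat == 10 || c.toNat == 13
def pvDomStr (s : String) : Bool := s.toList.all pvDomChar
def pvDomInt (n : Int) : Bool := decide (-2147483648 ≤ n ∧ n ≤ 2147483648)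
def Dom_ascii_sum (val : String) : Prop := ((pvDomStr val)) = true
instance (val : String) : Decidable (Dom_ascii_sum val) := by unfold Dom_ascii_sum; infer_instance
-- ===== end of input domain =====

-- ===== PORT A =====
-- Literal port of A: build the list of ASCII codes, then sum a * 10**b with b
-- counting down from len(ascii_word)-1 (loop state = (total_sum, b); b ≥ 0
-- whenever the power is taken, so 10 ^ b.toNat is exact for Python's 10**b).
def ascii_sum (val : String) : Int :=
  let ascii_word : List Int := val.toList.map (fun i => (i.toNat : Int))
  let b : Int := (ascii_word.length : Int) - 1
  let st := ascii_word.foldl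
    (fun (st : Int × Int) (a : Int) => (st.1 + a * 10 ^ st.2.toNat, st.2 - 1))
    (0, b)
  st.1

-- ===== PORT B =====
-- B: one-pass Horner accumulation total = total*10 + ord(ch).
def ascii_sum_alt (val : String) : Int :=
  val.toList.foldl (fun total ch => total * 10 + (ch.toNat : Int)) 0

-- ===== PRECONDITION & SPEC =====
def Spec_ascii_sum (val : String) (out : Int) : Prop := out = ascii_sum_alt val
instance (val : String) (out : Int) : Decidable (Spec_ascii_sum val out) := by unfold Spec_ascii_sum; infer_instance

-- ===== CLAIM (what is proved, stated in full; the proofs are below) =====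
def Claim_equal_ascii_sum : Prop := ∀ (val : String), Dom_ascii_sum val → Spec_ascii_sum val (ascii_sum val)

-- ===== LEMMAS AND PROOFS =====

/-- Horner's rule with an arbitrary initial accumulator. -/
theorem horner_init (l : List Char) (t : Int) :
    l.foldl (fun total ch => total * 10 + (ch.toNat : Int)) t
      = t * 10 ^ l.length + l.foldl (fun total ch => total * 10 + (ch.toNat : Int)) 0 := by
  induction l generalizing t with
  | nil => simp
  | cons c tl ih =>
    simp only [List.foldl_cons, List.length_cons]
    rw [ih (t * 10 + (c.toNat : Int)), ih ((0:Int) * 10 + (c.toNat : Int))]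
    ring

/-- A's positional-sum loop, started with exponent `len-1` and accumulator `s`,
    computes `s` plus the Horner value of the same characters. -/
theorem posSum_eq_horner (l : List Char) (s : Int) :
    ((l.map (fun i => (i.toNat : Int))).foldl
        (fun (st : Int × Int) (a : Int) => (st.1 + a * 10 ^ st.2.toNat, st.2 - 1))
        (s, (l.length : Int) - 1)).1
      = s + l.foldl (fun total ch => total * 10 + (ch.toNat : Int)) 0 := by
  induction l generalizing s with
  | nil => simp
  | cons c tl ih =>
    simp only [List.map_cons, List.foldl_cons, List.length_cons, Nat.cast_add,
      Nat.cast_one, add_sub_cancel_right, Int.toNat_natCast]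
    rw [ih (s + (c.toNat : Int) * 10 ^ tl.length),
      horner_init tl ((0:Int) * 10 + (c.toNat : Int))]
    ring

-- ===== VERDICT (by name: the statement is the Claim_ definition above) =====
theorem ascii_sum_spec : Claim_equal_ascii_sum := by
  intro val _
  unfold Spec_ascii_sum ascii_sum ascii_sum_alt
  simpa using posSum_eq_horner val.toList 0
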